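-- pv_equiv track=rewrite | github.com/baderzone/TopMed | gene_selection.py | get_gene_distance
-- ===== SOURCE A (Python) =====
-- def get_gene_distance(snp_gene_distance):
--     gene_distance = dict()
--     # first find the closest distance
--     for snp in snp_gene_distance:
--         for gene in snp_gene_distance[snp]:
--             d = snp_gene_distance[snp][gene]
--             if not gene in gene_distance:
--                 gene_distance[gene] = d
--             elif (d < gene_distance[gene]):
--                 gene_distance[gene] = d
--     return (gene_distance)
-- ===== SOURCE B (Python) =====
-- def get_gene_distance(snp_gene_distance):
--     # build-index-then-reduce: group all distances per gene, then take min per group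
--     groups = {}
--     for genes in snp_gene_distance.values():
--         for gene, d in genes.items():
--             groups.setdefault(gene, []).append(d)
--     return {gene: min(ds) for gene, ds in groups.items()}
-- ===== Notes on version B (the rewrite author's own statement) =====
-- stated objective: simpler
-- what changed: A maintains a running scalar minimum per gene inside the scan; B first groups every distance into a list per gene (setdefault/append, first-seen key order) and then reduces each group with min in a second comprehension pass.
import Mathlib
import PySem

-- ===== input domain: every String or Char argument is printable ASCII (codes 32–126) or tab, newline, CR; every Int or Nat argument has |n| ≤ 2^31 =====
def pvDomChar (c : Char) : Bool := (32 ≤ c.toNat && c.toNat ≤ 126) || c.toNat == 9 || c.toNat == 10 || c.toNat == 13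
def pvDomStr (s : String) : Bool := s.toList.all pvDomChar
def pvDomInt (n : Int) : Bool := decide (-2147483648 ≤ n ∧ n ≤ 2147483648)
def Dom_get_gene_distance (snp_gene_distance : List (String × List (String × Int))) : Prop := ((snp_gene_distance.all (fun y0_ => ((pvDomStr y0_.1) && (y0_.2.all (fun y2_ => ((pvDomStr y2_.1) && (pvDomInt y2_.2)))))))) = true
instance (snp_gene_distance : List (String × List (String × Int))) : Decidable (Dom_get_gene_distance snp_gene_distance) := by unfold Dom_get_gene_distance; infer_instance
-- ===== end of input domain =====

-- B replaces A's maintained running-minimum dict by a group-then-reduce decomposition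
-- (first pass groups every distance into a list per gene, second pass takes min per group); same cost, simpler shape.

-- ===== PORT A =====
def get_gene_distance (snp_gene_distance : List (String × List (String × Int))) : List (String × Int) :=
  (snp_gene_distance.foldl (fun gene_distance snp =>
      snp.2.foldl (fun gene_distance gp =>
        if !(gene_distance.contains gp.1) then gene_distance.insert gp.1 gp.2
        else if gp.2 < gene_distance.getD gp.1 0 then gene_distance.insert gp.1 gp.2
        else gene_distance) gene_distance)
    (PySem.Dict.empty : PySem.Dict String Int)).items

-- ===== PORT B =====
def get_gene_distance_alt (snp_gene_distance : List (String × List (String × Int))) : List (String × Int) :=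
  let groups : PySem.Dict String (List Int) :=
    snp_gene_distance.foldl (fun groups snp =>
      snp.2.foldl (fun groups gp => groups.modify gp.1 [] (· ++ [gp.2])) groups)
      PySem.Dict.empty
  groups.items.map (fun q => (q.1, (PySem.List.min? q.2 (fun y => y)).getD 0))

-- ===== PRECONDITION & SPEC =====
def Spec_get_gene_distance (snp_gene_distance : List (String × List (String × Int))) (out : List (String × Int)) : Prop := out = get_gene_distance_alt snp_gene_distance
instance (snp_gene_distance : List (String × List (String × Int))) (out : List (String × Int)) : Decidable (Spec_get_gene_distance snp_gene_distance out) := by unfold Spec_get_gene_distance; infer_instance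

-- ===== CLAIM (what is proved, stated in full; the proofs are below) =====
def Claim_equal_get_gene_distance : Prop := ∀ (snp_gene_distance : List (String × List (String × Int))), Dom_get_gene_distance snp_gene_distance → Spec_get_gene_distance snp_gene_distance (get_gene_distance snp_gene_distance)

-- ===== LEMMAS AND PROOFS =====

-- A's loop body on one (gene, distance) pair
def pvStepA (gd : PySem.Dict String Int) (gp : String × Int) : PySem.Dict String Int :=
  if !(gd.contains gp.1) then gd.insert gp.1 gp.2
  else if gp.2 < gd.getD gp.1 0 then gd.insert gp.1 gp.2
  else gd

-- running minimum over an optional accumulator (what A maintains per key)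
def pvMinAcc (o : Option Int) (ds : List Int) : Option Int :=
  ds.foldl (fun o x => some (match o with | none => x | some c => min c x)) o

lemma pvMinAcc_some (ds : List Int) : ∀ c : Int, pvMinAcc (some c) ds = some (ds.foldl min c) := by
  induction ds with
  | nil => intro c; rfl
  | cons x t ih => intro c; simpa [pvMinAcc, List.foldl_cons] using ih (min c x)

lemma pvStepA_keys (gd : PySem.Dict String Int) (gp : String × Int) :
    (pvStepA gd gp).keys = PySem.Set.add gd.keys gp.1 := by
  unfold pvStepA
  by_cases h : gd.contains gp.1
  · have hm : gp.1 ∈ gd.keys := (PySem.Dict.contains_iff_mem_keys gd gp.1).mp h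
    split_ifs <;> simp [PySem.Set.add, PySem.Set.contains, hm, PySem.Dict.keys_insert_of_contains, h]
  · have hm : gp.1 ∉ gd.keys := fun hmem => h ((PySem.Dict.contains_iff_mem_keys gd gp.1).mpr hmem)
    simp [h, PySem.Set.add, PySem.Set.contains, hm,
      PySem.Dict.keys_insert_of_not_contains gd gp.2 (by simpa using h)]

lemma pvFoldA_keys (pairs : List (String × Int)) :
    ∀ gd : PySem.Dict String Int,
      (pairs.foldl pvStepA gd).keys = PySem.Set.update gd.keys (pairs.map (·.1)) := by
  induction pairs with
  | nil => intro gd; simp [PySem.Set.update]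
  | cons p t ih =>
      intro gd
      rw [List.foldl_cons, ih, List.map_cons, PySem.Set.update_cons, pvStepA_keys]

lemma pvStepA_nodup (gd : PySem.Dict String Int) (gp : String × Int)
    (h : gd.keys.Nodup) : (pvStepA gd gp).keys.Nodup := by
  unfold pvStepA
  split_ifs <;> first | exact PySem.Dict.nodup_keys_insert _ _ _ h | exact h

lemma pvFoldA_nodup (pairs : List (String × Int)) :
    ∀ gd : PySem.Dict String Int, gd.keys.Nodup → (pairs.foldl pvStepA gd).keys.Nodup := by
  induction pairs with
  | nil => intro gd h; exact h
  | cons p t ih => intro gd h; exact ih _ (pvStepA_nodup gd p h)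

-- A's dict after the loop, pointwise: the running minimum of the matching distances
lemma pvFoldA_get? (pairs : List (String × Int)) :
    ∀ gd : PySem.Dict String Int, ∀ k : String,
      (pairs.foldl pvStepA gd).get? k
        = pvMinAcc (gd.get? k) ((pairs.filter (fun p => p.1 == k)).map (·.2)) := by
  induction pairs with
  | nil => intro gd k; rfl
  | cons p t ih =>
      intro gd k
      rw [List.foldl_cons, ih]
      by_cases hk : p.1 = k
      · subst hk
        have hstep : (pvStepA gd p).get? p.1
            = some (match gd.get? p.1 with | none => p.2 | some c => min c p.2) := by
          unfold pvStepA
          rcases hg : gd.get? p.1 with _ | c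
          · have hc : gd.contains p.1 = false := by
              rw [PySem.Dict.contains_eq_isSome_get?, hg]; rfl
            simp [hc, PySem.Dict.get?_insert_self]
          · have hc : gd.contains p.1 = true := by
              rw [PySem.Dict.contains_eq_isSome_get?, hg]; rfl
            have hd : gd.getD p.1 0 = c := PySem.Dict.getD_of_get?_eq_some gd 0 hg
            by_cases hlt : p.2 < c
            · simp [hc, hd, hlt, PySem.Dict.get?_insert_self, min_eq_right (le_of_lt hlt)]
            · simp [hc, hd, hlt, hg, min_eq_left (by omega : c ≤ p.2)]
        rw [hstep]
        simp only [List.filter_cons, beq_self_eq_true, if_pos, List.map_cons]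
        rcases hg : gd.get? p.1 with _ | c
        · simp [pvMinAcc, List.foldl_cons]
        · simp [pvMinAcc, List.foldl_cons]
      · have hstep : (pvStepA gd p).get? k = gd.get? k := by
          unfold pvStepA
          split_ifs <;> simp [PySem.Dict.get?_insert_of_ne _ _ (Ne.symm hk)]
        rw [hstep]
        simp [hk]

-- the two nested loops traverse the same flattened (gene, distance) pairs
lemma pvA_eq (l : List (String × List (String × Int))) :
    get_gene_distance l = ((l.flatMap (·.2)).foldl pvStepA PySem.Dict.empty).items := by
  unfold get_gene_distance
  rw [List.foldl_flatMap]
  rfl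

lemma pvB_eq (l : List (String × List (String × Int))) :
    get_gene_distance_alt l
      = ((l.flatMap (·.2)).foldl (fun g p => g.modify p.1 [] (· ++ [p.2])) PySem.Dict.empty).items.map
          (fun q => (q.1, (PySem.List.min? q.2 (fun y => y)).getD 0)) := by
  unfold get_gene_distance_alt
  rw [List.foldl_flatMap]

-- ===== VERDICT (by name: the statement is the Claim_ definition above) =====
theorem get_gene_distance_spec : Claim_equal_get_gene_distance := by
  intro l _
  unfold Spec_get_gene_distance
  rw [pvA_eq, pvB_eq]
  set pairs := l.flatMap (·.2) with hp
  set A := pairs.foldl pvStepA PySem.Dict.empty with hA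
  set B := pairs.foldl (fun g p => g.modify p.1 [] (· ++ [p.2])) PySem.Dict.empty with hB
  have hKA : A.keys = PySem.Set.ofList (pairs.map (·.1)) := by
    rw [hA, pvFoldA_keys]; simp [PySem.Set.update_nil_left]
  have hKB : B.keys = PySem.Set.ofList (pairs.map (·.1)) := by
    rw [hB, PySem.Dict.keys_foldl_modify_key]
    simp [PySem.Set.update_nil_left]
  have hNA : A.keys.Nodup := pvFoldA_nodup pairs _ (by simp)
  have hNB : B.keys.Nodup := by
    rw [hB]; exact PySem.Dict.nodup_keys_foldl_modify_key _ _ _ _ _ (by simp)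
  rw [PySem.Dict.items_eq_map_keys A hNA 0, PySem.Dict.items_eq_map_keys B hNB []]
  rw [List.map_map, hKA, hKB]
  apply List.map_congr_left
  intro k hk
  have hmem : k ∈ pairs.map (·.1) := by
    simpa [PySem.Set.mem_ofList] using hk
  obtain ⟨p0, hp0, hk0⟩ := List.mem_map.mp hmem
  have hms : p0.2 ∈ (pairs.filter (fun p => p.1 == k)).map (·.2) := by
    exact List.mem_map_of_mem (List.mem_filter.mpr ⟨hp0, by simp [hk0]⟩)
  set ms := (pairs.filter (fun p => p.1 == k)).map (·.2) with hmsdef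
  have hBgetD : B.getD k [] = ms := by
    rw [hB, PySem.Dict.getD_foldl_modify_append, hmsdef]
    simp
  have hAget : A.get? k = pvMinAcc none ms := by
    rw [hA, pvFoldA_get? pairs PySem.Dict.empty k, hmsdef]; simp
  rcases hcase : ms with _ | ⟨x, t⟩
  · rw [hcase] at hms; simp at hms
  · have hAv : A.getD k 0 = t.foldl min x := by
      rw [PySem.Dict.getD_eq_get?_getD, hAget, hcase]
      have h1 : pvMinAcc none (x :: t) = some (t.foldl min x) := by
        simpa [pvMinAcc, List.foldl_cons] using pvMinAcc_some t x
      rw [h1]; rfl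
    simp only [Function.comp, hBgetD, hcase, PySem.List.min?_id_cons, Option.getD_some, hAv]
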